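-- pv_equiv track=rewrite | github.com/amitv-innovaccer/Healthcare-MCP | src/hmcp/auth/utils.py | analyze_scopes
-- ===== SOURCE A (Python) =====
-- from typing import List, Tuple, Set
--
-- def analyze_scopes(scopes: List[str]) -> Tuple[Set[str], bool, bool]:
--     """Analyze scopes to identify their types
--
--     Args:
--         scopes: List of scopes to analyze
--
--     Returns:
--         Tuple containing:
--         - Set of resource scopes (non-system scopes)
--         - Boolean indicating if patient-context scopes are present
--         - Boolean indicating if OpenID Connect scopes are present
--     """
--     resource_scopes = set()
--     has_patient_context = False
--     has_openid = False
--
--     for scope in scopes: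
--         if scope == "openid":
--             has_openid = True
--         elif scope.startswith("patient/"):
--             has_patient_context = True
--             resource_scopes.add(scope[8:])  # Strip "patient/" prefix
--         elif scope not in ["profile", "offline_access", "launch/patient"]:
--             resource_scopes.add(scope)
--
--     # Also check for launch/patient scope which indicates patient context
--     if "launch/patient" in scopes:
--         has_patient_context = True
--
--     return resource_scopes, has_patient_context, has_openid
-- ===== SOURCE B (Python) =====
-- RESOURCE, PATIENT, OPENID, SYSTEM = 0, 1, 2, 3
--
-- def _classify(s):
--     """Map one scope string to a (tag, payload) pair."""
--     if s == "openid":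
--         return (OPENID, s)
--     if s.startswith("patient/"):
--         return (PATIENT, s[8:])
--     if s in ("profile", "offline_access", "launch/patient"):
--         return (SYSTEM, s)
--     return (RESOURCE, s)
--
-- def analyze_scopes(scopes):
--     # map phase: tag every scope once; reduce phase: three folds over the tags
--     tagged = [_classify(s) for s in scopes]
--     has_openid = any(t == OPENID for t, _ in tagged)
--     has_patient_context = (any(t == PATIENT for t, _ in tagged)
--                            or (SYSTEM, "launch/patient") in tagged)
--     resource_scopes = dict.fromkeys(v for t, v in tagged if t in (RESOURCE, PATIENT))
--     return set(resource_scopes), has_patient_context, has_openid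
-- ===== Notes on version B (the rewrite author's own statement) =====
-- stated objective: alternative
-- what changed: Replaces A's fused loop with three mutable accumulators by a map/reduce pipeline: a classifier tags every scope once into an explicit tagged list, and the two flags and the deduplicated resource set are then computed by separate reductions (any / membership / dict.fromkeys) over that tagged stream.
import Mathlib
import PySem

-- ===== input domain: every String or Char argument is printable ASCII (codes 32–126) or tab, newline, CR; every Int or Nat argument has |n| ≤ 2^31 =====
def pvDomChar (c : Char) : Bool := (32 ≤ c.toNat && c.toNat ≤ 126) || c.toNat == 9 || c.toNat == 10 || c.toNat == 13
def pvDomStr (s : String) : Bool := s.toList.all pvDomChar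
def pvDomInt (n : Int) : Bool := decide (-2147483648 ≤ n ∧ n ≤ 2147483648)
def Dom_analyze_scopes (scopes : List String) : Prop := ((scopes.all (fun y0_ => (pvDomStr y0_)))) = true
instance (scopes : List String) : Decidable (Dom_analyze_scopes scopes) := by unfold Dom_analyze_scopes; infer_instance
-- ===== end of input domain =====

-- B replaces A's fused loop with three mutable accumulators by a map/reduce pipeline:
-- tag every scope once with a classifier, then derive the two flags and the deduplicated
-- resource set by separate reductions over the tagged stream; objective: alternative.

-- ===== PORT A =====
-- one fused loop over the scopes, then a final launch/patient membership check
def analyze_scopes_step (acc : PySem.Set String × Bool × Bool) (scope : String) :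
    PySem.Set String × Bool × Bool :=
  if scope = "openid" then (acc.1, acc.2.1, true)
  else if PySem.Str.startswith scope "patient/" then
    (PySem.Set.add acc.1 (PySem.Str.slice scope (some 8) none), true, acc.2.2)
  else if !(["profile", "offline_access", "launch/patient"].contains scope) then
    (PySem.Set.add acc.1 scope, acc.2.1, acc.2.2)
  else acc

def analyze_scopes (scopes : List String) : List String × Bool × Bool :=
  let st := scopes.foldl analyze_scopes_step (PySem.Set.empty, false, false)
  let has_patient_context := if scopes.contains "launch/patient" then true else st.2.1
  (st.1, has_patient_context, st.2.2)

-- ===== PORT B =====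
-- tags: 0 = RESOURCE, 1 = PATIENT, 2 = OPENID, 3 = SYSTEM
def analyze_scopes_classify (s : String) : Int × String :=
  if s = "openid" then (2, s)
  else if PySem.Str.startswith s "patient/" then (1, PySem.Str.slice s (some 8) none)
  else if ["profile", "offline_access", "launch/patient"].contains s then (3, s)
  else (0, s)

def analyze_scopes_alt (scopes : List String) : List String × Bool × Bool :=
  let tagged := scopes.map analyze_scopes_classify
  let has_openid := tagged.any (fun t => t.1 == 2)
  let has_patient_context :=
    tagged.any (fun t => t.1 == 1) || tagged.contains ((3 : Int), "launch/patient")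
  let resource_scopes :=
    PySem.Set.ofList
      (PySem.List.dedup ((tagged.filter (fun t => t.1 == 0 || t.1 == 1)).map Prod.snd))
  (resource_scopes, has_patient_context, has_openid)

-- ===== PRECONDITION & SPEC =====
def Spec_analyze_scopes (scopes : List String) (out : List String × Bool × Bool) : Prop := out = analyze_scopes_alt scopes
instance (scopes : List String) (out : List String × Bool × Bool) : Decidable (Spec_analyze_scopes scopes out) := by unfold Spec_analyze_scopes; infer_instance

-- ===== CLAIM (what is proved, stated in full; the proofs are below) =====
def Claim_equal_analyze_scopes : Prop := ∀ (scopes : List String), Dom_analyze_scopes scopes → Spec_analyze_scopes scopes (analyze_scopes scopes)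

-- ===== LEMMAS AND PROOFS =====

-- the SYSTEM tag pairs in the tagged stream remember exactly the special scopes themselves
theorem analyze_scopes_classify_sys (s : String) :
    (analyze_scopes_classify s = ((3 : Int), "launch/patient")) ↔ s = "launch/patient" := by
  unfold analyze_scopes_classify
  split_ifs with h1 h2 h3
  · subst h1; decide
  · have hs : s ≠ "launch/patient" := by rintro rfl; revert h2; decide
    constructor
    · intro h; have := congrArg Prod.fst h; norm_num at this
    · intro h; exact absurd h hs
  · simp
  · have hs : s ≠ "launch/patient" := by
      intro h; exact h3 (by rw [h]; decide)
    constructor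
    · intro h; have := congrArg Prod.fst h; norm_num at this
    · intro h; exact absurd h hs

theorem analyze_scopes_contains_launch (scopes : List String) :
    (scopes.map analyze_scopes_classify).contains ((3 : Int), "launch/patient") =
      scopes.contains "launch/patient" := by
  simp [List.contains_eq_mem, analyze_scopes_classify_sys]

-- folding Set.add over a duplicate-free list of fresh elements just appends it
theorem analyze_scopes_foldl_add {α : Type} [DecidableEq α] (xs acc : List α)
    (hfresh : ∀ x ∈ xs, x ∉ acc) (hnd : xs.Nodup) :
    xs.foldl PySem.Set.add acc = acc ++ xs := by
  induction xs generalizing acc with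
  | nil => simp
  | cons x rest ih =>
    simp only [List.foldl_cons]
    have hx : PySem.Set.add acc x = acc ++ [x] := by
      simp [PySem.Set.add, PySem.Set.contains, List.contains_eq_mem,
        hfresh x (List.mem_cons_self)]
    rw [hx, ih (acc ++ [x])
      (by intro y hy; simp
          exact ⟨hfresh y (List.mem_cons_of_mem _ hy),
                 fun h => (List.nodup_cons.mp hnd).1 (h ▸ hy)⟩)
      (List.nodup_cons.mp hnd).2]
    simp

-- PySem.Set.ofList of an already-deduplicated list is the list itself
theorem pv_ofList_ofList {α : Type} [DecidableEq α] (xs : List α) :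
    PySem.Set.ofList (PySem.Set.ofList xs) = PySem.Set.ofList xs := by
  rw [PySem.Set.ofList_eq_foldl (PySem.Set.ofList xs)]
  simpa using analyze_scopes_foldl_add (PySem.Set.ofList xs) []
    (by simp) (PySem.Set.nodup_ofList xs)

theorem pv_foldl_add_idem {α : Type} [DecidableEq α] (xs : List α) :
    (xs.foldl PySem.Set.add []).foldl PySem.Set.add [] = xs.foldl PySem.Set.add [] := by
  simpa [PySem.Set.ofList_eq_foldl] using pv_ofList_ofList xs

-- loop invariant: A's fold from any state is the tagged stream's reductions plus or-ed flags
theorem analyze_scopes_fold (scopes : List String) (s0 : PySem.Set String) (hp ho : Bool) :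
    scopes.foldl analyze_scopes_step (s0, hp, ho) =
      ((((scopes.map analyze_scopes_classify).filter
            (fun t => t.1 == 0 || t.1 == 1)).map Prod.snd).foldl PySem.Set.add s0,
       hp || (scopes.map analyze_scopes_classify).any (fun t => t.1 == 1),
       ho || (scopes.map analyze_scopes_classify).any (fun t => t.1 == 2)) := by
  induction scopes generalizing s0 hp ho with
  | nil => simp
  | cons s rest ih =>
    by_cases h1 : s = "openid"
    · subst h1
      have h2 : PySem.Str.startswith "openid" "patient/" = false := by decide
      simp at h2
      simp [analyze_scopes_step, analyze_scopes_classify, ih]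
    · by_cases h2 : PySem.Str.startswith s "patient/" = true
      · have h1' : ¬ ("openid" = s) := fun h => h1 h.symm
        simp at h2 ⊢
        simp [analyze_scopes_step, analyze_scopes_classify, h1, h2, ih]
      · simp at h2
        have h1' : ¬ ("openid" = s) := fun h => h1 h.symm
        by_cases h3 : s ∈ ["profile", "offline_access", "launch/patient"]
        · have hm : (["profile", "offline_access", "launch/patient"].contains s) = true := by
            simp [List.contains_eq_mem, h3]
          fin_cases h3 <;> (simp at h2; simp [analyze_scopes_step, analyze_scopes_classify, ih, h2])
        · have hm : (["profile", "offline_access", "launch/patient"].contains s) = false := by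
            simp [List.contains_eq_mem, h3]
          simp at h3
          simp [analyze_scopes_step, analyze_scopes_classify, h1, h2, ih, h3]

-- ===== VERDICT (by name: the statement is the Claim_ definition above) =====
theorem analyze_scopes_spec : Claim_equal_analyze_scopes := by
  intro scopes _
  unfold Spec_analyze_scopes analyze_scopes analyze_scopes_alt
  rw [analyze_scopes_fold]
  simp only [PySem.List.dedup_eq_ofList,
    PySem.Set.ofList_eq_foldl, PySem.Set.empty, Bool.false_or,
    analyze_scopes_contains_launch]
  rcases hA : (scopes.map analyze_scopes_classify).any (fun t => t.1 == 1) <;>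
    rcases hL : scopes.contains "launch/patient" <;> simp [pv_foldl_add_idem]
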